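-- pv_equiv track=rewrite | github.com/HabibSlim/AdvancedLearningModels | sp_kernel.py | sp_kernel
-- ===== SOURCE A (Python) =====
-- def sp_kernel(s1, s2, k):
-- 	"""
-- 	Spectrum kernel function.
-- 	"""
-- 	n = len(s1)
-- 	k_dict = {}
--
-- 	for i in range(n - k + 1):
-- 		chunk = i + k
-- 		sub1, sub2 = s1[i:chunk], s2[i:chunk]
--
-- 		if sub1 in k_dict:
-- 			k_dict[sub1][0] += 1
-- 		else:
-- 			k_dict[sub1] = [1, 0]
--
-- 		if sub2 in k_dict:
-- 			k_dict[sub2][1] += 1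
-- 		else:
-- 			k_dict[sub2] = [0, 1]
--
-- 	return sum([v[0] * v[1] for v in k_dict.values()])
-- ===== SOURCE B (Python) =====
-- def sp_kernel(s1, s2, k):
-- 	"""
-- 	Spectrum kernel function: two independent counting passes instead of
-- 	one interleaved loop with a combined pair table.
-- 	"""
-- 	n = len(s1)
-- 	c1 = {}
-- 	for i in range(n - k + 1):
-- 		km = s1[i:i + k]
-- 		c1[km] = c1.get(km, 0) + 1
-- 	total = 0
-- 	for i in range(n - k + 1):
-- 		total += c1.get(s2[i:i + k], 0)
-- 	return total
-- ===== Notes on version B (the rewrite author's own statement) =====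
-- stated objective: simpler
-- what changed: Replaces the single interleaved loop maintaining a dict of [count1,count2] pairs (summed as products at the end) by a first pass counting s1's k-mers in one map and a second pass that directly accumulates, for each k-mer of s2, its count in s1.
import Mathlib
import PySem

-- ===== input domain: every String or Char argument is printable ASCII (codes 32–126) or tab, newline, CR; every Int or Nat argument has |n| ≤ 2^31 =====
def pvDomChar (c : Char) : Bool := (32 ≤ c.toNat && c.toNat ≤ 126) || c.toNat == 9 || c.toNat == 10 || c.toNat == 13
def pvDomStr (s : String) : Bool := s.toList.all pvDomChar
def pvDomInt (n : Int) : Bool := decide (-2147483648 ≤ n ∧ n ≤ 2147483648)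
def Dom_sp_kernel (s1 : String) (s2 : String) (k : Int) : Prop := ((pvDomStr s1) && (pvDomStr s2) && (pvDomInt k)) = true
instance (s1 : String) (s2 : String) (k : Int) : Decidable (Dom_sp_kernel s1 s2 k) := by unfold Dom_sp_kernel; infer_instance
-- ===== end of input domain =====

-- B replaces A's single interleaved loop over a dict of [count1,count2] pairs by two
-- independent passes: count s1's k-mers, then accumulate each s2 k-mer's count (objective: simpler).

-- ===== PORT A =====
-- loop body of A, first if/else: update the pair at key sub1
def spStep1 (d : PySem.Dict (List Char) (Int × Int)) (km : List Char) :
    PySem.Dict (List Char) (Int × Int) :=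
  if d.contains km then d.modify km (0, 0) (fun v => (v.1 + 1, v.2)) else d.insert km (1, 0)

-- loop body of A, second if/else: update the pair at key sub2
def spStep2 (d : PySem.Dict (List Char) (Int × Int)) (km : List Char) :
    PySem.Dict (List Char) (Int × Int) :=
  if d.contains km then d.modify km (0, 0) (fun v => (v.1, v.2 + 1)) else d.insert km (0, 1)

-- one iteration of A's for-loop: sub1 = s1[i:i+k], sub2 = s2[i:i+k]
def spStep (t1 t2 : List Char) (k : Int)
    (d : PySem.Dict (List Char) (Int × Int)) (i : Int) :
    PySem.Dict (List Char) (Int × Int) :=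
  spStep2 (spStep1 d (PySem.List.slice t1 (some i) (some (i + k))))
    (PySem.List.slice t2 (some i) (some (i + k)))

def sp_kernel (s1 : String) (s2 : String) (k : Int) : Int :=
  let n : Int := PySem.Str.len s1
  let d := (PySem.List.pyRange 0 (n - k + 1) 1).foldl (spStep s1.toList s2.toList k)
    PySem.Dict.empty
  (d.values.map (fun v => v.1 * v.2)).sum

-- ===== PORT B =====
def sp_kernel_alt (s1 : String) (s2 : String) (k : Int) : Int :=
  let n : Int := PySem.Str.len s1
  let t1 := s1.toList
  let t2 := s2.toList
  let c1 := (PySem.List.pyRange 0 (n - k + 1) 1).foldl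
    (fun (d : PySem.Dict (List Char) Int) i =>
      d.insert (PySem.List.slice t1 (some i) (some (i + k)))
        (d.getD (PySem.List.slice t1 (some i) (some (i + k))) 0 + 1))
    PySem.Dict.empty
  (PySem.List.pyRange 0 (n - k + 1) 1).foldl
    (fun total i => total + c1.getD (PySem.List.slice t2 (some i) (some (i + k))) 0) 0

-- ===== PRECONDITION & SPEC =====
def Spec_sp_kernel (s1 : String) (s2 : String) (k : Int) (out : Int) : Prop := out = sp_kernel_alt s1 s2 k
instance (s1 : String) (s2 : String) (k : Int) (out : Int) : Decidable (Spec_sp_kernel s1 s2 k out) := by unfold Spec_sp_kernel; infer_instance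

-- ===== CLAIM (what is proved, stated in full; the proofs are below) =====
def Claim_equal_sp_kernel : Prop := ∀ (s1 : String) (s2 : String) (k : Int), Dom_sp_kernel s1 s2 k → Spec_sp_kernel s1 s2 k (sp_kernel s1 s2 k)

-- ===== LEMMAS AND PROOFS =====

lemma getD_spStep1 (d : PySem.Dict (List Char) (Int × Int)) (km km' : List Char) :
    (spStep1 d km).getD km' (0, 0) =
      if km' = km then ((d.getD km (0, 0)).1 + 1, (d.getD km (0, 0)).2)
      else d.getD km' (0, 0) := by
  unfold spStep1
  rcases h : d.contains km with hf | ht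
  · rw [if_neg (by simp), PySem.Dict.getD_insert,
      PySem.Dict.getD_of_not_contains d (0, 0) h]
    simp
  · rw [if_pos rfl, PySem.Dict.getD_modify]

lemma getD_spStep2 (d : PySem.Dict (List Char) (Int × Int)) (km km' : List Char) :
    (spStep2 d km).getD km' (0, 0) =
      if km' = km then ((d.getD km (0, 0)).1, (d.getD km (0, 0)).2 + 1)
      else d.getD km' (0, 0) := by
  unfold spStep2
  rcases h : d.contains km with hf | ht
  · rw [if_neg (by simp), PySem.Dict.getD_insert,
      PySem.Dict.getD_of_not_contains d (0, 0) h]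
    simp
  · rw [if_pos rfl, PySem.Dict.getD_modify]

lemma mem_keys_spStep1 (d : PySem.Dict (List Char) (Int × Int)) (km km' : List Char) :
    km' ∈ (spStep1 d km).keys ↔ km' = km ∨ km' ∈ d.keys := by
  unfold spStep1
  split_ifs with h
  · rw [PySem.Dict.keys_modify, PySem.Dict.mem_keys_insert]
  · rw [PySem.Dict.mem_keys_insert]

lemma mem_keys_spStep2 (d : PySem.Dict (List Char) (Int × Int)) (km km' : List Char) :
    km' ∈ (spStep2 d km).keys ↔ km' = km ∨ km' ∈ d.keys := by
  unfold spStep2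
  split_ifs with h
  · rw [PySem.Dict.keys_modify, PySem.Dict.mem_keys_insert]
  · rw [PySem.Dict.mem_keys_insert]

lemma nodup_keys_spStep1 (d : PySem.Dict (List Char) (Int × Int)) (km : List Char)
    (h : d.keys.Nodup) : (spStep1 d km).keys.Nodup := by
  unfold spStep1
  split_ifs with hc
  · rw [PySem.Dict.keys_modify]; exact PySem.Dict.nodup_keys_insert _ _ _ h
  · exact PySem.Dict.nodup_keys_insert _ _ _ h

lemma nodup_keys_spStep2 (d : PySem.Dict (List Char) (Int × Int)) (km : List Char)
    (h : d.keys.Nodup) : (spStep2 d km).keys.Nodup := by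
  unfold spStep2
  split_ifs with hc
  · rw [PySem.Dict.keys_modify]; exact PySem.Dict.nodup_keys_insert _ _ _ h
  · exact PySem.Dict.nodup_keys_insert _ _ _ h

-- invariant of A's loop: per key, the dict holds the counts of that key among the
-- s1-slices and among the s2-slices processed so far
lemma foldl_spStep_getD (t1 t2 : List Char) (k : Int) :
    ∀ (js : List Int) (d : PySem.Dict (List Char) (Int × Int)) (km : List Char),
      (js.foldl (spStep t1 t2 k) d).getD km (0, 0) =
        ((d.getD km (0, 0)).1 +
            ((js.map (fun i => PySem.List.slice t1 (some i) (some (i + k)))).count km : Int),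
         (d.getD km (0, 0)).2 +
            ((js.map (fun i => PySem.List.slice t2 (some i) (some (i + k)))).count km : Int)) := by
  intro js
  induction js with
  | nil => intro d km; simp
  | cons j rest ih =>
    intro d km
    simp only [List.foldl_cons, List.map_cons, List.count_cons, beq_iff_eq]
    rw [ih]
    unfold spStep
    simp only [getD_spStep2, getD_spStep1]
    by_cases h2 : km = PySem.List.slice t2 (some j) (some (j + k)) <;>
      by_cases h1 : km = PySem.List.slice t1 (some j) (some (j + k))
    · have hba : PySem.List.slice t2 (some j) (some (j + k)) =
          PySem.List.slice t1 (some j) (some (j + k)) := h2.symm.trans h1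
      rw [if_pos h2, if_pos hba, if_pos h1.symm, if_pos h2.symm, h1]
      apply Prod.ext <;> dsimp only <;> push_cast <;> ring
    · have hba : ¬ PySem.List.slice t2 (some j) (some (j + k)) =
          PySem.List.slice t1 (some j) (some (j + k)) := fun h => h1 (h2.trans h)
      rw [if_pos h2, if_neg hba, if_neg (fun h => h1 h.symm), if_pos h2.symm, h2]
      apply Prod.ext <;> dsimp only <;> push_cast <;> ring
    · rw [if_neg h2, if_pos h1, if_pos h1.symm, if_neg (fun h => h2 h.symm), h1]
      apply Prod.ext <;> dsimp only <;> push_cast <;> ring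
    · rw [if_neg h2, if_neg h1, if_neg (fun h => h1 h.symm), if_neg (fun h => h2 h.symm)]
      apply Prod.ext <;> dsimp only <;> push_cast <;> ring

lemma foldl_spStep_mem_keys (t1 t2 : List Char) (k : Int) :
    ∀ (js : List Int) (d : PySem.Dict (List Char) (Int × Int)) (km : List Char),
      km ∈ (js.foldl (spStep t1 t2 k) d).keys ↔
        km ∈ d.keys ∨
        km ∈ js.map (fun i => PySem.List.slice t1 (some i) (some (i + k))) ∨
        km ∈ js.map (fun i => PySem.List.slice t2 (some i) (some (i + k))) := by
  intro js
  induction js with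
  | nil => intro d km; simp
  | cons j rest ih =>
    intro d km
    simp only [List.foldl_cons, List.map_cons, List.mem_cons]
    rw [ih]
    unfold spStep
    rw [mem_keys_spStep2, mem_keys_spStep1]
    tauto

lemma foldl_spStep_nodup (t1 t2 : List Char) (k : Int) :
    ∀ (js : List Int) (d : PySem.Dict (List Char) (Int × Int)),
      d.keys.Nodup → (js.foldl (spStep t1 t2 k) d).keys.Nodup := by
  intro js
  induction js with
  | nil => intro d h; simpa using h
  | cons j rest ih =>
    intro d h
    exact ih _ (nodup_keys_spStep2 _ _ (nodup_keys_spStep1 _ _ h))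

-- the counting identity: summing count₁·count₂ over the distinct keys equals
-- summing count₁ over the occurrences of the second list
lemma sum_count_mul {α : Type} [DecidableEq α] (K L1 L2 : List α) (hn : K.Nodup)
    (hm : ∀ x, x ∈ K ↔ x ∈ L1 ∨ x ∈ L2) :
    (K.map (fun x => (L1.count x : Int) * (L2.count x : Int))).sum =
      (L2.map (fun x => (L1.count x : Int))).sum := by
  rw [← List.sum_toFinset _ hn, Finset.sum_list_map_count]
  have hsub : L2.toFinset ⊆ K.toFinset := by
    intro x hx
    rw [List.mem_toFinset] at *
    exact (hm x).2 (Or.inr hx)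
  rw [← Finset.sum_subset hsub]
  · apply Finset.sum_congr rfl
    intro x hx
    rw [List.mem_toFinset] at hx
    simp
    ring
  · intro x _ hx
    rw [List.mem_toFinset] at hx
    have : L2.count x = 0 := List.count_eq_zero.2 hx
    simp [this]

-- the two loop results agree, abstracted over the shared index list
lemma sp_main (t1 t2 : List Char) (k : Int) (js : List Int) :
    (((js.foldl (spStep t1 t2 k) PySem.Dict.empty).values.map (fun v => v.1 * v.2)).sum : Int) =
      ((js.map (fun i => PySem.List.slice t2 (some i) (some (i + k)))).map
        (fun x => ((js.map (fun i => PySem.List.slice t1 (some i) (some (i + k)))).count x : Int))).sum := by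
  set L1 := js.map (fun i => PySem.List.slice t1 (some i) (some (i + k))) with hL1
  set L2 := js.map (fun i => PySem.List.slice t2 (some i) (some (i + k))) with hL2
  set D := js.foldl (spStep t1 t2 k) PySem.Dict.empty with hD
  have hnd : D.keys.Nodup :=
    foldl_spStep_nodup t1 t2 k js PySem.Dict.empty PySem.Dict.nodup_keys_empty
  rw [PySem.Dict.values_eq_map_keys D hnd (0, 0), List.map_map]
  have hget : ∀ km, D.getD km (0, 0) = ((L1.count km : Int), (L2.count km : Int)) := by
    intro km
    rw [hD, foldl_spStep_getD]
    simp [hL1, hL2]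
  have hmem : ∀ km, km ∈ D.keys ↔ km ∈ L1 ∨ km ∈ L2 := by
    intro km
    rw [hD, foldl_spStep_mem_keys, hL1, hL2]
    simp [PySem.Dict.keys_empty]
  have hbeq : (instBEqOfDecidableEq : BEq (List Char)) = List.instBEq :=
    lawful_beq_subsingleton _ _
  have := sum_count_mul D.keys L1 L2 hnd hmem
  rw [hbeq] at this
  calc (D.keys.map ((fun v : Int × Int => v.1 * v.2) ∘ fun km => D.getD km (0, 0))).sum
      = (D.keys.map (fun km => (L1.count km : Int) * (L2.count km : Int))).sum := by
        congr 1; apply List.map_congr_left; intro km _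
        simp only [Function.comp_apply, hget km]
    _ = (L2.map (fun x => (L1.count x : Int))).sum := this

-- ===== VERDICT (by name: the statement is the Claim_ definition above) =====
theorem sp_kernel_spec : Claim_equal_sp_kernel := by
  intro s1 s2 k _
  unfold Spec_sp_kernel sp_kernel sp_kernel_alt
  show (((PySem.List.pyRange 0 (PySem.Str.len s1 - k + 1) 1).foldl
      (spStep s1.toList s2.toList k) PySem.Dict.empty).values.map (fun v => v.1 * v.2)).sum =
    (PySem.List.pyRange 0 (PySem.Str.len s1 - k + 1) 1).foldl
      (fun total i => total +
        ((PySem.List.pyRange 0 (PySem.Str.len s1 - k + 1) 1).foldl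
          (fun (d : PySem.Dict (List Char) Int) i =>
            d.insert (PySem.List.slice s1.toList (some i) (some (i + k)))
              (d.getD (PySem.List.slice s1.toList (some i) (some (i + k))) 0 + 1))
          PySem.Dict.empty).getD (PySem.List.slice s2.toList (some i) (some (i + k))) 0) 0
  rw [← List.foldl_map (f := fun i => PySem.List.slice s1.toList (some i) (some (i + k)))
        (g := fun (d : PySem.Dict (List Char) Int) x => d.insert x (d.getD x 0 + 1)),
    PySem.Dict.foldl_insert_getD_add_one_eq_counter,
    ← List.foldl_map (f := fun i => PySem.List.slice s2.toList (some i) (some (i + k)))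
        (g := fun (total : Int) x => total + (PySem.Dict.counter _).getD x 0),
    PySem.List.foldl_add]
  simp only [PySem.Dict.getD_counter, zero_add]
  exact sp_main s1.toList s2.toList k _
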